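-- pv_equiv track=rewrite | github.com/Langston-Wang01/Omi-Live-Coach | baseten.py | custom_strip
-- ===== SOURCE A (Python) =====
-- import string
--
-- def custom_strip(s: str, chars: str = None) -> str:
--     # ... (this function remains unchanged)
--     if chars is None:
--         chars_to_remove = string.whitespace
--     else:
--         chars_to_remove = chars
--     start_index = 0
--     while start_index < len(s) and s[start_index] in chars_to_remove:
--         start_index += 1
--     end_index = len(s) - 1
--     while end_index >= start_index and s[end_index] in chars_to_remove:
--         end_index -= 1
--     return s[start_index : end_index + 1]
-- ===== SOURCE B (Python) =====
-- import string
--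
--
-- def _lstripped(t, remove):
--     """Drop leading characters of t that are in remove (dropwhile via an iterator)."""
--     it = iter(t)
--     for c in it:
--         if c not in remove:
--             return c + ''.join(it)
--     return ''
--
--
-- def custom_strip(s: str, chars: str = None) -> str:
--     remove = set(string.whitespace if chars is None else chars)
--     left = _lstripped(s, remove)
--     return _lstripped(left[::-1], remove)[::-1]
-- ===== Notes on version B (the rewrite author's own statement) =====
-- stated objective: idiomatic
-- what changed: Replaced the two-pointer start/end index scan followed by a slice with two directional trims that maintain strings: drop leading stripped chars, reverse, drop again, reverse back; membership tested against a set.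
import Mathlib
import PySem

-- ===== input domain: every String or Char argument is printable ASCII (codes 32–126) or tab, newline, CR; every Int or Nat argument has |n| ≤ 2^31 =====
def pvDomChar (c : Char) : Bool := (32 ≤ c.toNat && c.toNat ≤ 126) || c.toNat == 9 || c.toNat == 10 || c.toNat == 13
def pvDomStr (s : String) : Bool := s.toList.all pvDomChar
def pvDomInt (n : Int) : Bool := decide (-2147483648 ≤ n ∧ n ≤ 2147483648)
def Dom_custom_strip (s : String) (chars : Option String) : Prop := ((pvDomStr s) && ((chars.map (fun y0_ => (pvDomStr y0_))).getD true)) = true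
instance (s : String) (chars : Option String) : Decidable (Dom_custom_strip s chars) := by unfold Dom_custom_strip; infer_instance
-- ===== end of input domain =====

-- B replaces A's two-pointer start/end index scan + slice by two directional trims
-- (drop leading stripped chars, reverse, drop again, reverse back); objective: more idiomatic.

-- string.whitespace = "\t\n\x0b\x0c\r " (shared constant of both sources)
def pvWhitespace : List Char := ['\t', '\n', Char.ofNat 11, Char.ofNat 12, '\r', ' ']

-- ===== PORT A =====
-- the first while loop: advance start_index while it is in range and s[start_index] ∈ chars_to_remove
-- (Python's `c in str` for the single character s[i] is exactly character membership, ported as List.contains)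
def pvStartIdx (cs remove : List Char) (i : Nat) : Nat :=
  if h : i < cs.length then
    if remove.contains cs[i] then pvStartIdx cs remove (i + 1) else i
  else i
termination_by cs.length - i

-- the second while loop: decrease end_index while end_index ≥ start_index and s[end_index] ∈ chars_to_remove
-- (getD is a totality guard only: whenever the condition is evaluated with start ≤ e, the index is in range)
def pvEndIdx (cs remove : List Char) (start : Nat) (e : Int) : Int :=
  if h : (start : Int) ≤ e ∧ remove.contains (cs.getD e.toNat ' ') then
    pvEndIdx cs remove start (e - 1)
  else e
termination_by (e + 1).toNat
decreasing_by have := h.1; omega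

def custom_strip (s : String) (chars : Option String) : String :=
  let chars_to_remove : List Char :=
    match chars with
    | none => pvWhitespace
    | some c => c.toList
  let cs := s.toList
  let start_index := pvStartIdx cs chars_to_remove 0
  let end_index := pvEndIdx cs chars_to_remove start_index ((cs.length : Int) - 1)
  String.ofList (PySem.List.slice cs (some (start_index : Int)) (some (end_index + 1)))

-- ===== PORT B =====
-- _lstripped: consume the iterator while c ∈ remove; at the first survivor return it plus the rest
def pvLstripped (cs : List Char) (remove : PySem.Set Char) : List Char :=
  match cs with
  | [] => []
  | c :: it => if PySem.Set.contains remove c then pvLstripped it remove else c :: it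

def custom_strip_alt (s : String) (chars : Option String) : String :=
  let remove : PySem.Set Char :=
    PySem.Set.ofList (match chars with | none => pvWhitespace | some c => c.toList)
  let left := pvLstripped s.toList remove
  String.ofList (pvLstripped left.reverse remove).reverse

-- ===== PRECONDITION & SPEC =====
def Spec_custom_strip (s : String) (chars : Option String) (out : String) : Prop := out = custom_strip_alt s chars
instance (s : String) (chars : Option String) (out : String) : Decidable (Spec_custom_strip s chars out) := by unfold Spec_custom_strip; infer_instance

-- ===== CLAIM (what is proved, stated in full; the proofs are below) =====
def Claim_equal_custom_strip : Prop := ∀ (s : String) (chars : Option String), Dom_custom_strip s chars → Spec_custom_strip s chars (custom_strip s chars)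

-- ===== LEMMAS AND PROOFS =====

lemma pv_dropWhile_eq_drop (p : Char → Bool) (l : List Char) :
    l.dropWhile p = l.drop (l.takeWhile p).length := by
  induction l with
  | nil => rfl
  | cons c t ih => by_cases h : p c <;> simp [List.dropWhile, List.takeWhile, h, ih]

lemma pv_lstripped_eq (r : List Char) (cs : List Char) :
    pvLstripped cs (PySem.Set.ofList r) = cs.dropWhile (fun c => r.contains c) := by
  induction cs with
  | nil => rfl
  | cons c t ih =>
      by_cases h : c ∈ r <;>
        simp [pvLstripped, List.dropWhile, List.contains_eq_mem, h, ih]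

lemma pv_startIdx_eq (cs remove : List Char) :
    ∀ (n i : Nat), cs.length - i ≤ n → i ≤ cs.length →
      pvStartIdx cs remove i = i + ((cs.drop i).takeWhile (fun c => remove.contains c)).length := by
  intro n
  induction n with
  | zero =>
      intro i hn hi
      have : i = cs.length := by omega
      subst this
      rw [pvStartIdx]
      simp
  | succ n ih =>
      intro i hn hi
      rw [pvStartIdx]
      by_cases h : i < cs.length
      · have hdrop : cs.drop i = cs[i] :: cs.drop (i + 1) := List.drop_eq_getElem_cons h
        rw [dif_pos h]
        by_cases hc : cs[i] ∈ remove
        · rw [if_pos (by simpa [List.contains_eq_mem] using hc),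
              ih (i + 1) (by omega) (by omega), hdrop]
          simp only [List.takeWhile_cons, List.contains_eq_mem, hc, decide_true, if_true,
            List.length_cons]
          omega
        · rw [if_neg (by simpa [List.contains_eq_mem] using hc), hdrop]
          simp [List.contains_eq_mem, hc]
      · have : i = cs.length := by omega
        subst this
        simp

lemma pv_endIdx_eq (cs remove : List Char) :
    ∀ (n : Nat) (start : Nat) (e : Int), e = (start : Int) + n - 1 → e < (cs.length : Int) →
      pvEndIdx cs remove start e
        = e - (((((cs.drop start).take n).reverse).takeWhile (fun c => remove.contains c)).length : Int) := by
  intro n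
  induction n with
  | zero =>
      intro start e he _
      rw [pvEndIdx]
      have : ¬ ((start : Int) ≤ e ∧ remove.contains (cs.getD e.toNat ' ')) := by
        intro ⟨h1, _⟩; omega
      rw [dif_neg this]
      simp
  | succ n ih =>
      intro start e he hlt
      have hidx : start + n < cs.length := by omega
      have hEt : e.toNat = start + n := by omega
      have hget : cs.getD e.toNat ' ' = cs[start + n] := by
        rw [hEt]; exact List.getD_eq_getElem cs ' ' hidx
      have hseg : (cs.drop start).take (n + 1) = (cs.drop start).take n ++ [cs[start + n]] := by
        rw [List.take_add_one]
        congr 1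
        rw [List.getElem?_drop]
        simp [List.getElem?_eq_getElem (by omega : start + n < cs.length)]
      rw [pvEndIdx, hget]
      by_cases hc : cs[start + n] ∈ remove
      · have hcond : (start : Int) ≤ e ∧ remove.contains cs[start + n] := by
          refine ⟨by omega, by simpa [List.contains_eq_mem] using hc⟩
        rw [dif_pos hcond, ih start (e - 1) (by omega) (by omega), hseg]
        simp only [List.reverse_append, List.reverse_cons, List.reverse_nil, List.nil_append,
          List.cons_append, List.takeWhile_cons, List.contains_eq_mem, hc, decide_true, if_true,
          List.length_cons]
        omega
      · have hcond : ¬ ((start : Int) ≤ e ∧ remove.contains cs[start + n]) := by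
          intro hco
          exact hc (by simpa [List.contains_eq_mem] using hco.2)
        rw [dif_neg hcond, hseg]
        simp [List.contains_eq_mem, hc]

lemma pv_main (cs r : List Char) :
    String.ofList (PySem.List.slice cs (some ((pvStartIdx cs r 0 : Nat) : Int))
      (some (pvEndIdx cs r (pvStartIdx cs r 0) ((cs.length : Int) - 1) + 1)))
    = String.ofList (pvLstripped (pvLstripped cs (PySem.Set.ofList r)).reverse
        (PySem.Set.ofList r)).reverse := by
  set p : Char → Bool := fun c => r.contains c with hp
  set start := pvStartIdx cs r 0 with hs0
  have hstart : start = (cs.takeWhile p).length := by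
    rw [hs0, pv_startIdx_eq cs r cs.length 0 (by omega) (by omega)]
    simp only [List.drop_zero, Nat.zero_add, hp]
  have hsle : start ≤ cs.length := by
    rw [hstart]; exact (List.takeWhile_sublist p).length_le
  set t := cs.dropWhile p with ht
  have hdrop : cs.drop start = t := by
    rw [hstart, ht, pv_dropWhile_eq_drop]
  have htlen : t.length = cs.length - start := by
    rw [← hdrop, List.length_drop]
  set n := cs.length - start with hn
  have hend : pvEndIdx cs r start ((cs.length : Int) - 1)
      = (cs.length : Int) - 1 - ((t.reverse.takeWhile p).length : Int) := by
    rw [pv_endIdx_eq cs r n start ((cs.length : Int) - 1) (by omega) (by omega)]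
    congr 3
    rw [hdrop, List.take_of_length_le (by omega)]
  set k := (t.reverse.takeWhile p).length with hk
  have hkle : k ≤ n := by
    have h1 := (List.takeWhile_sublist (l := t.reverse) p).length_le
    rw [List.length_reverse] at h1
    omega
  have hA : PySem.List.slice cs (some (start : Int))
      (some (pvEndIdx cs r start ((cs.length : Int) - 1) + 1)) = t.take (n - k) := by
    rw [hend]
    have hb : (cs.length : Int) - 1 - (k : Int) + 1 = ((cs.length - k : Nat) : Int) := by omega
    rw [hb, PySem.List.slice_toNat cs (by omega) (by omega)]
    simp only [Int.toNat_natCast, hdrop]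
    congr 1
    omega
  have hB : (pvLstripped (pvLstripped cs (PySem.Set.ofList r)).reverse
      (PySem.Set.ofList r)).reverse = t.take (n - k) := by
    rw [pv_lstripped_eq, pv_lstripped_eq, ← hp, ← ht,
        pv_dropWhile_eq_drop p t.reverse, ← hk, List.reverse_drop]
    simp [htlen]
  rw [hA, hB]

-- ===== VERDICT (by name: the statement is the Claim_ definition above) =====
theorem custom_strip_spec : Claim_equal_custom_strip := by
  intro s chars _
  unfold Spec_custom_strip custom_strip custom_strip_alt
  cases chars <;> exact pv_main s.toList _
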